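-- pv_equiv track=rewrite | github.com/KojiHoen/maya_utils | maya/naming/num.py | convert_measurements
-- ===== SOURCE A (Python) =====
-- MEASUREMENTS_MAPPER = {
--     "pt": "pt",
--     "point": "pt",
--     "mm": "mm",
--     "millimeter": "mm",
--     "cm": "cm",
--     "centimeter": "cm",
--     "m": "m",
--     "meter": "m",
--     "km": "km",
--     "kilometer": "km",
-- }
--
-- MEASUREMENTS = set(MEASUREMENTS_MAPPER.keys())
--
-- def convert_measurements(sections):
--     """
--     Based on the matching MEASUREMENTS the sections will be combined
--     conforming to the measurements naming convention.
--
--     :param list sections: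
--     :return: Combined measurements sections
--     :rtype: list
--     """
--     # variables
--     v = ""
--     indices = []
--     sections_edit = sections[:]
--
--     # get matching measurements
--     sections_set = set(sections)
--     match = MEASUREMENTS & sections_set
--
--     # get matches
--     for m in match:
--         # get indices
--         index = sections.index(m)
--         indices.append(index)
--
--         # get digit before measurement
--         if index != 0 and sections[index-1].isdigit():
--             indices.append(index-1)
--
--     # sort indices
--     indices.sort()
--     indices.reverse()
--     indices.append(-2)
--
--     # merge measurements and digits
--     for i, n in zip(indices[:-1], indices[1:]):
--         m = sections[i]
--         m = MEASUREMENTS_MAPPER.get(m, m)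
--
--         v = m + v
--         sections_edit.pop(i)
--
--         if n != i - 1:
--             sections_edit.insert(i, v)
--             v = ""
--
--     return sections_edit
-- ===== SOURCE B (Python) =====
-- MEASUREMENTS_MAPPER = {
--     "pt": "pt",
--     "point": "pt",
--     "mm": "mm",
--     "millimeter": "mm",
--     "cm": "cm",
--     "centimeter": "cm",
--     "m": "m",
--     "meter": "m",
--     "km": "km",
--     "kilometer": "km",
-- }
--
-- MEASUREMENTS = set(MEASUREMENTS_MAPPER.keys())
--
-- def convert_measurements(sections):
--     # mark the first occurrence of each matching measurement, plus a digit right before it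
--     marked = set()
--     for m in MEASUREMENTS & set(sections):
--         index = sections.index(m)
--         marked.add(index)
--         if index != 0 and sections[index - 1].isdigit():
--             marked.add(index - 1)
--
--     # single forward pass: emit each maximal run of marked positions as one combined token
--     out = []
--     for i, s in enumerate(sections):
--         if i not in marked:
--             out.append(s)
--         elif i - 1 not in marked:
--             combined = ""
--             j = i
--             while j in marked:
--                 combined += MEASUREMENTS_MAPPER.get(sections[j], sections[j])
--                 j += 1
--             out.append(combined)
--     return out
-- ===== Notes on version B (the rewrite author's own statement) =====
-- stated objective: simpler
-- what changed: A sorts the marked indices descending, appends a -2 sentinel and mutates a copy with pop/insert while threading a pending-string accumulator; B computes the same marked-position set and then does one forward pass over enumerate(sections), emitting each maximal run of marked positions as a single combined token.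
import Mathlib
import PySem

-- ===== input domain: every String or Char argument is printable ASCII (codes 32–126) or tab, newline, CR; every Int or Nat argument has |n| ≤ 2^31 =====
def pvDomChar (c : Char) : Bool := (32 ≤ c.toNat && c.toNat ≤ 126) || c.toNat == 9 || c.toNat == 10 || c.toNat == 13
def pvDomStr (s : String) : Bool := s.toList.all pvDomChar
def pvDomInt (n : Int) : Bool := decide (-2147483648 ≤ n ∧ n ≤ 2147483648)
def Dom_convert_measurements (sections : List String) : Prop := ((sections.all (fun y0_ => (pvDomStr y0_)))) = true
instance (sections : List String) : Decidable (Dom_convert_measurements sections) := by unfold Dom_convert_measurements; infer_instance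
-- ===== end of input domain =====

-- B replaces A's descending-sort + pop/insert mutation by one forward pass that emits each
-- maximal run of marked positions as a single combined token (objective: simpler).

-- ===== PORT A =====
def MEASUREMENTS_MAPPER : PySem.Dict String String :=
  PySem.Dict.ofList [("pt","pt"),("point","pt"),("mm","mm"),("millimeter","mm"),
    ("cm","cm"),("centimeter","cm"),("m","m"),("meter","m"),("km","km"),("kilometer","km")]

def MEASUREMENTS : PySem.Set String := PySem.Set.ofList MEASUREMENTS_MAPPER.keys

-- MEASUREMENTS_MAPPER.get(m, m) applied to sections[i] (a subexpression both Pythons contain)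
def pvTok (sections : List String) (i : Int) : String :=
  let m := PySem.List.pyGetD sections i ""
  PySem.Dict.getD MEASUREMENTS_MAPPER m m

-- body of A's first loop: indices.append(index), plus the digit right before the measurement
def pvIndexStep (sections : List String) (indices : List Int) (m : String) : List Int :=
  match PySem.List.index? sections m with
  | some index =>
    let indices := indices ++ [(index : Int)]
    if index ≠ 0 ∧ PySem.Str.strIsdigit (PySem.List.pyGetD sections ((index : Int) - 1) "") then
      indices ++ [(index : Int) - 1]
    else indices
  | none => indices   -- unreachable: every m in match occurs in sections

-- body of A's merge loop (state (v, sections_edit), item (i, n))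
def pvMergeStep (sections : List String) (st : String × List String) (p : Int × Int) : String × List String :=
  let v := pvTok sections p.1 ++ st.1
  let sections_edit :=
    match PySem.List.pop? st.2 p.1 with
    | some r => r.2
    | none => st.2   -- unreachable: p.1 is a valid index of sections_edit here
  if p.2 ≠ p.1 - 1 then ("", PySem.List.insert sections_edit p.1 v)
  else (v, sections_edit)

def convert_measurements (sections : List String) : List String :=
  let sections_edit := sections
  let sections_set : PySem.Set String := PySem.Set.ofList sections
  let mtch := PySem.Set.inter MEASUREMENTS sections_set
  -- Python iterates `match` in hash order; `indices` is sorted below, so the result is order-independent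
  let indices : List Int := mtch.foldl (pvIndexStep sections) []
  let indices := PySem.List.sorted indices (fun x => x) false
  let indices := indices.reverse
  let indices := indices ++ [(-2 : Int)]
  let st := (List.zip (PySem.List.slice indices none (some (-1)))
                      (PySem.List.slice indices (some 1) none)).foldl
              (pvMergeStep sections) ("", sections_edit)
  st.2

-- ===== PORT B =====
-- while j in marked: combined += MEASUREMENTS_MAPPER.get(...); j += 1  (fuel len+1 bounds the walk)
def pvRun (sections : List String) (marked : PySem.Set Int) : Nat → Nat → String
  | 0, _ => ""
  | fuel+1, j =>
    if PySem.Set.contains marked (j : Int) then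
      pvTok sections (j : Int) ++ pvRun sections marked fuel (j+1)
    else ""

-- body of B's marking loop: marked.add(index) (+ the digit right before the measurement)
def pvMarkStep (sections : List String) (marked : PySem.Set Int) (m : String) : PySem.Set Int :=
  match PySem.List.index? sections m with
  | some index =>
    let marked := PySem.Set.add marked (index : Int)
    if index ≠ 0 ∧ PySem.Str.strIsdigit (PySem.List.pyGetD sections ((index : Int) - 1) "") then
      PySem.Set.add marked ((index : Int) - 1)
    else marked
  | none => marked

-- body of B's forward pass over enumerate(sections)
def pvEmitStep (sections : List String) (marked : PySem.Set Int) (out : List String) (p : Int × String) : List String :=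
  if ¬ PySem.Set.contains marked p.1 then out ++ [p.2]
  else if ¬ PySem.Set.contains marked (p.1 - 1) then
    out ++ [pvRun sections marked (sections.length + 1) p.1.toNat]
  else out

def convert_measurements_alt (sections : List String) : List String :=
  let marked := (PySem.Set.inter MEASUREMENTS (PySem.Set.ofList sections)).foldl
                  (pvMarkStep sections) PySem.Set.empty
  (PySem.List.enumerate sections 0).foldl (pvEmitStep sections marked) []

-- ===== PRECONDITION & SPEC =====
def Spec_convert_measurements (sections : List String) (out : List String) : Prop := out = convert_measurements_alt sections
instance (sections : List String) (out : List String) : Decidable (Spec_convert_measurements sections out) := by unfold Spec_convert_measurements; infer_instance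

-- ===== CLAIM (what is proved, stated in full; the proofs are below) =====
def Claim_equal_convert_measurements : Prop := ∀ (sections : List String), Dom_convert_measurements sections → Spec_convert_measurements sections (convert_measurements sections)

-- ===== LEMMAS AND PROOFS =====

-- the two indices a measurement m contributes (first occurrence, plus a digit right before it)
def pvContrib (xs : List String) (m : String) : List Int :=
  match PySem.List.index? xs m with
  | some index =>
    if index ≠ 0 ∧ PySem.Str.strIsdigit (PySem.List.pyGetD xs ((index : Int) - 1) "") then
      [(index : Int), (index : Int) - 1]
    else [(index : Int)]
  | none => []

-- the set of marked positions, as a list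
def pvI (xs : List String) : List Int :=
  (PySem.Set.inter MEASUREMENTS (PySem.Set.ofList xs)).flatMap (pvContrib xs)

def pvL (xs : List String) : List Int := PySem.List.sorted (pvI xs) (fun x => x) false

-- A's merge loop with its one-step lookahead made explicit
def gA (xs : List String) : List Int → String × List String → String × List String
  | [], st => st
  | [i], st => pvMergeStep xs st (i, -2)
  | i :: n :: rest, st => gA xs (n :: rest) (pvMergeStep xs st (i, n))

def joinRun (xs : List String) (s : Int) : Nat → String
  | 0 => ""
  | k+1 => pvTok xs s ++ joinRun xs (s+1) k

def descRun (e : Int) : Nat → List Int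
  | 0 => []
  | k+1 => e :: descRun (e-1) k

def ascRun (s : Int) : Nat → List Int
  | 0 => []
  | k+1 => s :: ascRun (s+1) k

-- descending flattening of an ascending run list (the order A's merge loop consumes)
def descOf (rs : List (Int × Int)) : List Int :=
  rs.reverse.flatMap (fun p => descRun p.2 (p.2 + 1 - p.1).toNat)

def flatA (rs : List (Int × Int)) : List Int :=
  rs.flatMap (fun p => ascRun p.1 (p.2 + 1 - p.1).toNat)

-- group a strictly ascending list into maximal consecutive runs
def runsOf : Option (Int × Int) → List Int → List (Int × Int)
  | none, [] => []
  | some se, [] => [se]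
  | none, b :: t => runsOf (some (b, b)) t
  | some (s, e), b :: t =>
    if b = e + 1 then runsOf (some (s, b)) t else (s, e) :: runsOf (some (b, b)) t

-- well-formed ascending run list: starts ≥ lo, s ≤ e, gaps of at least one position
def WFA (lo : Int) : List (Int × Int) → Prop
  | [] => True
  | (s, e) :: rs => lo ≤ s ∧ s ≤ e ∧ WFA (e + 2) rs

def InRuns (rs : List (Int × Int)) (j : Int) : Prop := ∃ p ∈ rs, p.1 ≤ j ∧ j ≤ p.2

-- the common normal form: segment [i, c) of xs with each run replaced by its combined token
def buildC (xs : List String) : List (Int × Int) → Int → Int → List String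
  | [], i, c => (xs.drop i.toNat).take (c - i).toNat
  | (s, e) :: rs, i, c =>
      (xs.drop i.toNat).take (s - i).toNat ++ joinRun xs s (e + 1 - s).toNat :: buildC xs rs (e + 1) c

-- B's forward pass, recursively
def passB (xs : List String) (marked : PySem.Set Int) : List String → Int → List String
  | [], _ => []
  | x :: l, i =>
    if ¬ PySem.Set.contains marked i then x :: passB xs marked l (i + 1)
    else if ¬ PySem.Set.contains marked (i - 1) then
      pvRun xs marked (xs.length + 1) i.toNat :: passB xs marked l (i + 1)
    else passB xs marked l (i + 1)

-- ---- basic list helpers ----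
theorem pv_eraseIdx_append (l : List String) (t : List String) (x : String) :
    (l ++ x :: t).eraseIdx l.length = l ++ t := by
  induction l with
  | nil => rfl
  | cons a l ih => simp [ih]

theorem pv_pop_at (l t : List String) (x : String) :
    PySem.List.pop? (l ++ x :: t) ((l.length : Nat) : Int) = some (x, l ++ t) := by
  rw [PySem.List.pop?_natCast (l ++ x :: t) l.length (by simp)]
  simp [pv_eraseIdx_append l t x]

theorem pv_insert_at (l t : List String) (v : String) :
    PySem.List.insert (l ++ t) ((l.length : Nat) : Int) v = l ++ v :: t := by
  rw [PySem.List.insert_natCast (l ++ t) l.length v (by simp)]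
  simp

theorem pv_take_snoc (xs : List String) (m : Nat) (h : m < xs.length) :
    xs.take (m+1) = xs.take m ++ [xs[m]] := by
  rw [List.take_add_one]
  simp [List.getElem?_eq_getElem h]

-- ---- fold characterisations ----
theorem pv_fold_index (xs : List String) : ∀ (ms : List String) (acc : List Int),
    ms.foldl (pvIndexStep xs) acc = acc ++ ms.flatMap (pvContrib xs) := by
  intro ms
  induction ms with
  | nil => intro acc; simp
  | cons m ms ih =>
    intro acc
    have hstep : pvIndexStep xs acc m = acc ++ pvContrib xs m := by
      simp only [pvIndexStep, pvContrib]
      cases h : PySem.List.index? xs m with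
      | none => simp
      | some index => dsimp only; split_ifs <;> simp
    simp only [List.foldl_cons, hstep, List.flatMap_cons, ih, List.append_assoc]

theorem pv_fold_mark (xs : List String) : ∀ (ms : List String) (acc : PySem.Set Int),
    ms.foldl (pvMarkStep xs) acc = PySem.Set.update acc (ms.flatMap (pvContrib xs)) := by
  intro ms
  induction ms with
  | nil => intro acc; simp [PySem.Set.update_nil]
  | cons m ms ih =>
    intro acc
    have hstep : pvMarkStep xs acc m = PySem.Set.update acc (pvContrib xs m) := by
      simp only [pvMarkStep, pvContrib]
      cases h : PySem.List.index? xs m with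
      | none => simp [PySem.Set.update_nil]
      | some index =>
        dsimp only; split_ifs <;> simp [PySem.Set.update_cons, PySem.Set.update_nil]
    simp only [List.foldl_cons, hstep, List.flatMap_cons, ih, PySem.Set.update_append]

theorem pv_fold_zip (xs : List String) : ∀ (l : List Int) (st : String × List String),
    List.foldl (pvMergeStep xs) st (List.zip l ((l ++ [(-2 : Int)]).tail)) = gA xs l st := by
  intro l
  induction l with
  | nil => intro st; rfl
  | cons i l ih =>
    intro st
    cases l with
    | nil => rfl
    | cons n t =>
      simpa [gA] using ih (pvMergeStep xs st (i, n))

theorem pv_fold_emit (xs : List String) (marked : PySem.Set Int) :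
    ∀ (l : List String) (i : Int) (acc : List String),
    (PySem.List.enumerate l i).foldl (pvEmitStep xs marked) acc = acc ++ passB xs marked l i := by
  intro l
  induction l with
  | nil => intro i acc; simp [passB]
  | cons x l ih =>
    intro i acc
    simp only [PySem.List.enumerate_cons, List.foldl_cons, pvEmitStep, passB]
    split_ifs <;> simp [ih]

-- ---- facts about the marked positions ----
theorem pv_meas_not_digit : ∀ m ∈ MEASUREMENTS, PySem.Str.strIsdigit m = false := by decide

theorem pv_getD_eq (xs : List String) (k : Nat) (h : k < xs.length) : xs.getD k "" = xs[k] := by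
  simp [List.getD, List.getElem?_eq_getElem h]

theorem pv_contrib_mem (xs : List String) (m : String) (j : Int) (hj : j ∈ pvContrib xs m) :
    ∃ k : Nat, PySem.List.index? xs m = some k ∧ k < xs.length ∧ xs.getD k "" = m ∧
      (j = (k : Int) ∨ (j = (k : Int) - 1 ∧ 1 ≤ k ∧
        PySem.Str.strIsdigit (xs.getD (k-1) "") = true)) := by
  unfold pvContrib at hj
  cases h : PySem.List.index? xs m with
  | none => rw [h] at hj; simp at hj
  | some k =>
    rw [h] at hj
    dsimp only at hj
    obtain ⟨hk, hget, -⟩ := PySem.List.getElem_of_index?_eq_some h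
    refine ⟨k, rfl, hk, by rw [pv_getD_eq xs k hk]; exact hget, ?_⟩
    split_ifs at hj with hcond
    · obtain ⟨hk0, hdig⟩ := hcond
      have hk1 : 1 ≤ k := Nat.one_le_iff_ne_zero.mpr hk0
      have h1 : ((k : Int) - 1).toNat = k - 1 := by omega
      rw [PySem.List.pyGetD_eq_getElem xs "" (by omega) (by push_cast; omega)] at hdig
      simp only [h1] at hdig
      simp only [List.mem_cons, List.mem_singleton, List.not_mem_nil, or_false] at hj
      rcases hj with hj | hj
      · exact Or.inl hj
      · exact Or.inr ⟨hj, hk1, by rwa [pv_getD_eq xs (k-1) (by omega)]⟩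
    · simp only [List.mem_singleton] at hj
      exact Or.inl hj

theorem pv_contrib_nodup (xs : List String) (m : String) : (pvContrib xs m).Nodup := by
  unfold pvContrib
  cases PySem.List.index? xs m with
  | none => simp
  | some k => dsimp only; split_ifs <;> simp <;> omega

theorem pv_mem_ms (xs : List String) (m : String)
    (hm : m ∈ PySem.Set.inter MEASUREMENTS (PySem.Set.ofList xs)) :
    m ∈ MEASUREMENTS ∧ m ∈ xs := by
  have h := (PySem.Set.mem_inter (s := MEASUREMENTS) (t := PySem.Set.ofList xs) (y := m)).mp hm
  exact ⟨h.1, (PySem.Set.mem_ofList (xs := xs) (y := m)).mp h.2⟩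

theorem pv_contrib_disjoint (xs : List String) (m m' : String)
    (hm : m ∈ MEASUREMENTS) (hm' : m' ∈ MEASUREMENTS) (hne : m ≠ m') :
    ∀ j ∈ pvContrib xs m, j ∉ pvContrib xs m' := by
  intro j hj hj'
  obtain ⟨k, -, hk, hv, hc⟩ := pv_contrib_mem xs m j hj
  obtain ⟨k', -, hk', hv', hc'⟩ := pv_contrib_mem xs m' j hj'
  have hkk : k ≠ k' := by
    intro h; exact hne (by rw [← hv, ← hv', h])
  rcases hc with hj1 | ⟨hj1, hge, hdig⟩ <;> rcases hc' with hj2 | ⟨hj2, hge', hdig'⟩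
  · omega
  · -- j = k and j = k' - 1 : xs[k'-1] = m is a digit, but measurements are not digits
    have hkeq : k = k' - 1 := by omega
    rw [← hkeq, hv] at hdig'
    rw [pv_meas_not_digit m hm] at hdig'
    exact Bool.false_ne_true hdig'
  · have hkeq : k' = k - 1 := by omega
    rw [← hkeq, hv'] at hdig
    rw [pv_meas_not_digit m' hm'] at hdig
    exact Bool.false_ne_true hdig
  · omega

theorem pv_I_bounds (xs : List String) : ∀ j ∈ pvI xs, 0 ≤ j ∧ j < (xs.length : Int) := by
  intro j hj
  obtain ⟨m, -, hjm⟩ := List.mem_flatMap.mp hj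
  obtain ⟨k, -, hk, -, hc⟩ := pv_contrib_mem xs m j hjm
  rcases hc with h | ⟨h, hge, -⟩ <;> omega

theorem pv_nodup_flatMap (g : String → List Int) :
    ∀ (l : List String), l.Nodup → (∀ x ∈ l, (g x).Nodup) →
    (∀ x ∈ l, ∀ y ∈ l, x ≠ y → ∀ j ∈ g x, j ∉ g y) → (l.flatMap g).Nodup := by
  intro l
  induction l with
  | nil => simp
  | cons a l ih =>
    intro hnd h1 h2
    simp only [List.flatMap_cons]
    refine List.Nodup.append (h1 a (by simp)) (ih (List.Nodup.of_cons hnd) ?_ ?_) ?_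
    · exact fun x hx => h1 x (List.mem_cons_of_mem a hx)
    · exact fun x hx y hy => h2 x (List.mem_cons_of_mem a hx) y (List.mem_cons_of_mem a hy)
    · intro j hja hjl
      obtain ⟨y, hy, hjy⟩ := List.mem_flatMap.mp hjl
      have hay : a ≠ y := by
        intro h; rw [h] at hnd; exact (List.nodup_cons.mp hnd).1 hy
      exact h2 a (by simp) y (List.mem_cons_of_mem a hy) hay j hja hjy

theorem pv_I_nodup (xs : List String) : (pvI xs).Nodup := by
  apply pv_nodup_flatMap
  · exact PySem.Set.nodup_inter MEASUREMENTS (PySem.Set.ofList xs) (PySem.Set.nodup_ofList _)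
  · exact fun m _ => pv_contrib_nodup xs m
  · intro m hm m' hm' hne
    exact pv_contrib_disjoint xs m m' (pv_mem_ms xs m hm).1 (pv_mem_ms xs m' hm').1 hne

theorem pv_L_pairwise (xs : List String) : (pvL xs).Pairwise (· < ·) := by
  have hle : (pvL xs).Pairwise (fun a b => a ≤ b) :=
    PySem.List.sorted_pairwise (pvI xs) (fun x => x)
  have hnd : (pvL xs).Nodup :=
    (List.Perm.nodup_iff (PySem.List.sorted_perm (pvI xs) (fun x => x) false)).mpr (pv_I_nodup xs)
  exact (hle.and hnd).imp (fun h => lt_of_le_of_ne h.1 h.2)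

theorem pv_L_mem (xs : List String) (j : Int) : j ∈ pvL xs ↔ j ∈ pvI xs :=
  PySem.List.mem_sorted ..

-- ---- runsOf ----
theorem pv_ascRun_snoc : ∀ (k : Nat) (s : Int), ascRun s (k+1) = ascRun s k ++ [s + (k : Int)] := by
  intro k
  induction k with
  | zero => intro s; simp [ascRun]
  | succ k ih =>
    intro s
    show s :: ascRun (s+1) (k+1) = (s :: ascRun (s+1) k) ++ [s + ((k+1 : Nat) : Int)]
    rw [ih (s+1)]
    simp only [List.cons_append, List.cons.injEq, true_and]
    congr 2
    push_cast
    ring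

theorem pv_descRun_snoc : ∀ (k : Nat) (e : Int), descRun e (k+1) = descRun e k ++ [e - (k : Int)] := by
  intro k
  induction k with
  | zero => intro e; simp [descRun]
  | succ k ih =>
    intro e
    show e :: descRun (e-1) (k+1) = (e :: descRun (e-1) k) ++ [e - ((k+1 : Nat) : Int)]
    rw [ih (e-1)]
    simp only [List.cons_append, List.cons.injEq, true_and]
    congr 2
    push_cast
    ring

theorem pv_rev_ascRun : ∀ (k : Nat) (s : Int), (ascRun s k).reverse = descRun (s + (k : Int) - 1) k := by
  intro k
  induction k with
  | zero => intro s; simp [ascRun, descRun]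
  | succ k ih =>
    intro s
    show (s :: ascRun (s+1) k).reverse = descRun (s + ((k+1 : Nat) : Int) - 1) (k+1)
    rw [List.reverse_cons, ih (s+1)]
    have h1 : s + 1 + (k : Int) - 1 = s + ((k+1 : Nat) : Int) - 1 := by push_cast; ring
    rw [h1, pv_descRun_snoc]
    congr 2
    push_cast
    ring

theorem pv_InRuns_cons (p : Int × Int) (rs : List (Int × Int)) (j : Int) :
    InRuns (p :: rs) j ↔ (p.1 ≤ j ∧ j ≤ p.2) ∨ InRuns rs j := by
  unfold InRuns
  constructor
  · rintro ⟨q, hq, h1, h2⟩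
    rcases List.mem_cons.mp hq with rfl | hq'
    · exact Or.inl ⟨h1, h2⟩
    · exact Or.inr ⟨q, hq', h1, h2⟩
  · rintro (⟨h1, h2⟩ | ⟨q, hq, h1, h2⟩)
    · exact ⟨p, by simp, h1, h2⟩
    · exact ⟨q, List.mem_cons_of_mem _ hq, h1, h2⟩

theorem pv_runsExt : ∀ (L : List Int) (s e lo : Int), s ≤ e → lo ≤ s →
    (∀ x ∈ L, e < x) → L.Pairwise (· < ·) →
    WFA lo (runsOf (some (s, e)) L) ∧
    (∀ j, InRuns (runsOf (some (s, e)) L) j ↔ (s ≤ j ∧ j ≤ e) ∨ j ∈ L) ∧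
    flatA (runsOf (some (s, e)) L) = ascRun s (e + 1 - s).toNat ++ L ∧
    (∀ p ∈ runsOf (some (s, e)) L, p.2 = e ∨ p.2 ∈ L) := by
  intro L
  induction L with
  | nil =>
    intro s e lo hse hlo _ _
    refine ⟨⟨hlo, hse, trivial⟩, ?_, by simp [runsOf, flatA], by simp [runsOf]⟩
    intro j
    simp [runsOf, InRuns]
  | cons b t ih =>
    intro s e lo hse hlo hL hp
    have hb : e < b := hL b (by simp)
    have ht : ∀ x ∈ t, b < x := fun x hx => (List.pairwise_cons.mp hp).1 x hx
    have hpt : t.Pairwise (· < ·) := (List.pairwise_cons.mp hp).2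
    simp only [runsOf]
    split_ifs with hbe
    · -- b = e + 1 : extend the current run
      obtain ⟨W, M, F, B⟩ := ih s b lo (by omega) hlo ht hpt
      refine ⟨W, ?_, ?_, ?_⟩
      · intro j
        rw [M j]
        constructor
        · rintro (⟨h1, h2⟩ | h)
          · rcases (by omega : j ≤ e ∨ j = b) with h3 | h3
            · exact Or.inl ⟨h1, h3⟩
            · exact Or.inr (by simp [h3])
          · exact Or.inr (List.mem_cons_of_mem _ h)
        · rintro (⟨h1, h2⟩ | h)
          · exact Or.inl ⟨h1, by omega⟩
          · rcases List.mem_cons.mp h with rfl | h'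
            · exact Or.inl ⟨by omega, by omega⟩
            · exact Or.inr h'
      · rw [F]
        have h1 : (b + 1 - s).toNat = (e + 1 - s).toNat + 1 := by omega
        rw [h1, pv_ascRun_snoc]
        have h2 : s + ((e + 1 - s).toNat : Int) = b := by omega
        rw [h2]
        simp
      · intro p hp'
        rcases B p hp' with h | h
        · exact Or.inr (by simp [h])
        · exact Or.inr (List.mem_cons_of_mem _ h)
    · -- b ≥ e + 2 : close the run and start a new one
      have hb2 : e + 2 ≤ b := by omega
      obtain ⟨W', M', F', B'⟩ := ih b b (e + 2) le_rfl hb2 ht hpt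
      refine ⟨⟨hlo, hse, W'⟩, ?_, ?_, ?_⟩
      · intro j
        rw [pv_InRuns_cons]
        simp only [M']
        constructor
        · rintro (h | ⟨h1, h2⟩ | h)
          · exact Or.inl h
          · exact Or.inr (by simp [show j = b by omega])
          · exact Or.inr (List.mem_cons_of_mem _ h)
        · rintro (h | h)
          · exact Or.inl h
          · rcases List.mem_cons.mp h with rfl | h'
            · exact Or.inr (Or.inl ⟨le_rfl, le_rfl⟩)
            · exact Or.inr (Or.inr h')
      · simp only [flatA, List.flatMap_cons] at F' ⊢
        rw [F']
        have h1 : (b + 1 - b).toNat = 1 := by omega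
        simp [h1, ascRun]
      · intro p hp'
        rcases List.mem_cons.mp hp' with rfl | h
        · exact Or.inl rfl
        · rcases B' p h with h' | h'
          · exact Or.inr (by simp [h'])
          · exact Or.inr (List.mem_cons_of_mem _ h')

theorem pv_runsOf (L : List Int) (lo : Int) (hp : L.Pairwise (· < ·)) (hlo : ∀ x ∈ L, lo ≤ x) :
    WFA lo (runsOf none L) ∧
    (∀ j, InRuns (runsOf none L) j ↔ j ∈ L) ∧
    flatA (runsOf none L) = L ∧
    (∀ p ∈ runsOf none L, p.2 ∈ L) := by
  cases L with
  | nil =>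
    refine ⟨trivial, ?_, rfl, by simp [runsOf]⟩
    intro j
    simp [runsOf, InRuns]
  | cons a t =>
    have ht : ∀ x ∈ t, a < x := fun x hx => (List.pairwise_cons.mp hp).1 x hx
    have hpt : t.Pairwise (· < ·) := (List.pairwise_cons.mp hp).2
    obtain ⟨W, M, F, B⟩ := pv_runsExt t a a lo le_rfl (hlo a (by simp)) ht hpt
    simp only [runsOf]
    refine ⟨W, ?_, ?_, ?_⟩
    · intro j
      rw [M j]
      constructor
      · rintro (⟨h1, h2⟩ | h)
        · exact by simp [show j = a by omega]
        · exact List.mem_cons_of_mem _ h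
      · intro h
        rcases List.mem_cons.mp h with rfl | h'
        · exact Or.inl ⟨le_rfl, le_rfl⟩
        · exact Or.inr h'
    · rw [F]
      have h1 : (a + 1 - a).toNat = 1 := by omega
      simp [h1, ascRun]
    · intro p hp'
      rcases B p hp' with h | h
      · simp [h]
      · exact List.mem_cons_of_mem _ h

theorem pv_descOf_eq : ∀ (rs : List (Int × Int)), (∀ p ∈ rs, p.1 ≤ p.2) →
    descOf rs = (flatA rs).reverse := by
  intro rs
  induction rs with
  | nil => intro _; rfl
  | cons p rs ih =>
    intro h
    have hp : p.1 ≤ p.2 := h p (by simp)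
    have ih' := ih (fun q hq => h q (List.mem_cons_of_mem _ hq))
    simp only [descOf, flatA, List.reverse_cons, List.flatMap_append, List.flatMap_cons,
      List.flatMap_nil, List.reverse_append, List.append_nil] at ih' ⊢
    rw [ih', pv_rev_ascRun]
    have h1 : p.1 + (((p.2 + 1 - p.1).toNat : Nat) : Int) - 1 = p.2 := by omega
    rw [h1]

-- ---- WFA helpers ----
theorem pv_WFA_mono : ∀ (rs : List (Int × Int)) (lo lo' : Int), lo' ≤ lo → WFA lo rs → WFA lo' rs := by
  intro rs
  cases rs with
  | nil => intro _ _ _ _; trivial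
  | cons p rs =>
    intro lo lo' h hw
    obtain ⟨h1, h2, h3⟩ := hw
    exact ⟨by omega, h2, h3⟩

theorem pv_WFA_le : ∀ (rs : List (Int × Int)) (lo : Int), WFA lo rs → ∀ p ∈ rs, lo ≤ p.1 ∧ p.1 ≤ p.2 := by
  intro rs
  induction rs with
  | nil => intro lo _ p hp; simp at hp
  | cons q rs ih =>
    intro lo hw p hp
    obtain ⟨h1, h2, h3⟩ := hw
    rcases List.mem_cons.mp hp with rfl | hp'
    · exact ⟨h1, h2⟩
    · have := ih (q.2 + 2) h3 p hp'
      exact ⟨by omega, this.2⟩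

theorem pv_WFA_snoc : ∀ (rs : List (Int × Int)) (lo : Int) (s e : Int),
    WFA lo (rs ++ [(s, e)]) → WFA lo rs ∧ s ≤ e ∧ lo ≤ s ∧ ∀ p ∈ rs, p.2 + 2 ≤ s := by
  intro rs
  induction rs with
  | nil =>
    intro lo s e hw
    obtain ⟨h1, h2, -⟩ := hw
    exact ⟨trivial, h2, h1, by simp⟩
  | cons q rs ih =>
    intro lo s e hw
    obtain ⟨h1, h2, h3⟩ := hw
    obtain ⟨W, hse, hs, hall⟩ := ih (q.2 + 2) s e h3
    refine ⟨⟨h1, h2, W⟩, hse, by omega, ?_⟩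
    intro p hp
    rcases List.mem_cons.mp hp with rfl | hp'
    · omega
    · exact hall p hp'

theorem pv_InRuns_ge : ∀ (rs : List (Int × Int)) (lo : Int) (j : Int), WFA lo rs → InRuns rs j → lo ≤ j := by
  rintro rs lo j hw ⟨p, hp, h1, h2⟩
  have := pv_WFA_le rs lo hw p hp
  omega

theorem pv_descOf_head (rs : List (Int × Int)) (lo n : Int) (t : List Int)
    (hw : WFA lo rs) (h : descOf rs = n :: t) : ∃ p ∈ rs, n = p.2 := by
  cases rs using List.reverseRecOn with
  | nil => simp [descOf] at h
  | append_singleton rs q =>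
    have hq : q.1 ≤ q.2 := (pv_WFA_le _ lo hw q (by simp)).2
    have hl : (q.2 + 1 - q.1).toNat = (q.2 - q.1).toNat + 1 := by omega
    simp only [descOf, List.reverse_append, List.reverse_cons, List.reverse_nil,
      List.nil_append, List.cons_append, List.flatMap_cons, hl, descRun] at h
    exact ⟨q, by simp, (List.cons.injEq .. |>.mp h).1.symm⟩

-- ---- joinRun ----
theorem pv_joinRun_snoc : ∀ (k : Nat) (s : Int) (xs : List String),
    joinRun xs s (k+1) = joinRun xs s k ++ pvTok xs (s + (k : Int)) := by
  intro k
  induction k with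
  | zero =>
    intro s xs
    show pvTok xs s ++ "" = "" ++ pvTok xs (s + ((0 : Nat) : Int))
    simp
  | succ k ih =>
    intro s xs
    show pvTok xs s ++ joinRun xs (s+1) (k+1) = (pvTok xs s ++ joinRun xs (s+1) k) ++ pvTok xs (s + ((k+1 : Nat) : Int))
    rw [ih (s+1), ← String.append_assoc]
    congr 2
    push_cast
    ring

-- ---- A's merge loop processes one run ----
theorem pv_pop_take (xs : List String) (Z : List String) (m : Nat) (h : m < xs.length) :
    PySem.List.pop? (xs.take (m+1) ++ Z) ((m : Nat) : Int) = some (xs[m], xs.take m ++ Z) := by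
  have hl : (xs.take m).length = m := by simp; omega
  have hp := pv_pop_at (xs.take m) Z xs[m]
  rw [hl] at hp
  rw [pv_take_snoc xs m h, List.append_assoc]
  exact hp

theorem pv_insert_take (xs : List String) (Z : List String) (v : String) (m : Nat) (hm : m ≤ xs.length) :
    PySem.List.insert (xs.take m ++ Z) ((m : Nat) : Int) v = xs.take m ++ v :: Z := by
  have hl : (xs.take m).length = m := by simp; omega
  have hp := pv_insert_at (xs.take m) Z v
  rw [hl] at hp
  exact hp

theorem pv_block (xs : List String) : ∀ (k : Nat) (s : Nat) (v₀ : String) (Z : List String) (T : List Int),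
    s + k < xs.length →
    (∀ n t, T = n :: t → n ≠ (s : Int) - 1) →
    gA xs (descRun ((s + k : Nat) : Int) (k+1) ++ T) (v₀, xs.take (s + k + 1) ++ Z)
      = gA xs T ("", xs.take s ++ (joinRun xs (s : Int) (k+1) ++ v₀) :: Z) := by
  intro k
  induction k with
  | zero =>
    intro s v₀ Z T hlen hT
    have hstep : ∀ n : Int, n ≠ (s : Int) - 1 →
        pvMergeStep xs (v₀, xs.take (s + 1) ++ Z) (((s : Nat) : Int), n)
          = ("", xs.take s ++ (joinRun xs (s : Int) 1 ++ v₀) :: Z) := by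
      intro n hn
      simp only [pvMergeStep, pv_pop_take xs Z s (by omega)]
      rw [if_pos hn, pv_insert_take xs Z _ s (by omega)]
      simp [joinRun, String.append_assoc]
    cases T with
    | nil =>
      show gA xs [((s + 0 : Nat) : Int)] _ = _
      simp only [Nat.add_zero, gA]
      exact hstep (-2) (by omega)
    | cons n t =>
      show gA xs (((s + 0 : Nat) : Int) :: n :: t) _ = _
      simp only [Nat.add_zero, gA]
      rw [hstep n (hT n t rfl)]
  | succ k ih =>
    intro s v₀ Z T hlen hT
    rw [show s + (k+1) = s + k + 1 from rfl]
    have he : ((s + k + 1 : Nat) : Int) - 1 = ((s + k : Nat) : Int) := by push_cast; ring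
    show gA xs (((s + k + 1 : Nat) : Int) :: descRun (((s + k + 1 : Nat) : Int) - 1) (k+1) ++ T) _ = _
    rw [he]
    have hd : descRun ((s + k : Nat) : Int) (k+1) = ((s + k : Nat) : Int) :: descRun (((s + k : Nat) : Int) - 1) k := rfl
    rw [hd]
    simp only [List.cons_append, gA]
    have hpop : pvMergeStep xs (v₀, xs.take (s + k + 1 + 1) ++ Z) (((s + k + 1 : Nat) : Int), ((s + k : Nat) : Int))
        = (pvTok xs ((s + k + 1 : Nat) : Int) ++ v₀, xs.take (s + k + 1) ++ Z) := by
      simp only [pvMergeStep, pv_pop_take xs Z (s + k + 1) (by omega)]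
      rw [if_neg (by push_cast; omega)]
    rw [hpop, ← List.cons_append, ← hd]
    rw [ih s (pvTok xs ((s + k + 1 : Nat) : Int) ++ v₀) Z T (by omega) hT]
    have hj : joinRun xs (s : Int) (k+2) ++ v₀
        = joinRun xs (s : Int) (k+1) ++ (pvTok xs ((s + k + 1 : Nat) : Int) ++ v₀) := by
      have harg : ((s : Int) + ((k+1 : Nat) : Int)) = ((s + k + 1 : Nat) : Int) := by omega
      rw [pv_joinRun_snoc (k+1) (s : Int) xs, harg, String.append_assoc]
    rw [hj]

theorem pv_buildC_snoc (xs : List String) : ∀ (rs : List (Int × Int)) (s e i c : Int),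
    buildC xs (rs ++ [(s, e)]) i c
      = buildC xs rs i s ++ joinRun xs s (e + 1 - s).toNat :: (xs.drop (e + 1).toNat).take (c - (e + 1)).toNat := by
  intro rs
  induction rs with
  | nil => intro s e i c; simp [buildC]
  | cons q rs ih =>
    intro s e i c
    obtain ⟨a, b⟩ := q
    simp only [List.cons_append, buildC, ih, List.append_assoc]

theorem pv_A_main (xs : List String) : ∀ (rs : List (Int × Int)) (c : Int) (Z : List String),
    WFA 0 rs → (∀ p ∈ rs, p.2 < c) → 0 ≤ c → c ≤ (xs.length : Int) →
    (gA xs (descOf rs) ("", xs.take c.toNat ++ Z)).2 = buildC xs rs 0 c ++ Z := by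
  intro rs
  induction rs using List.reverseRecOn with
  | nil =>
    intro c Z _ _ _ _
    simp [descOf, gA, buildC]
  | append_singleton rs q ih =>
    obtain ⟨s, e⟩ := q
    intro c Z hw hbc hc0 hcn
    obtain ⟨W0, hse, hs0, hgap⟩ := pv_WFA_snoc rs 0 s e hw
    have hec : e < c := hbc (s, e) (by simp)
    obtain ⟨sn, rfl⟩ : ∃ sn : Nat, s = (sn : Int) := ⟨s.toNat, by omega⟩
    obtain ⟨kn, rfl⟩ : ∃ kn : Nat, e = (sn : Int) + (kn : Int) := ⟨(e - sn).toNat, by omega⟩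
    -- rewrite the descending index list
    have hdesc : descOf (rs ++ [((sn : Int), (sn : Int) + (kn : Int))])
        = descRun ((sn + kn : Nat) : Int) (kn + 1) ++ descOf rs := by
      simp only [descOf, List.reverse_append, List.reverse_cons, List.reverse_nil,
        List.nil_append, List.cons_append, List.flatMap_cons]
      congr 2 <;> omega
    rw [hdesc]
    -- split the initial segment at the top of the run
    have hsplit : xs.take c.toNat = xs.take (sn + kn + 1) ++ (xs.drop (sn + kn + 1)).take (c.toNat - (sn + kn + 1)) := by
      rw [← List.take_add]
      congr 1
      omega
    rw [hsplit, List.append_assoc]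
    rw [pv_block xs kn sn "" ((xs.drop (sn + kn + 1)).take (c.toNat - (sn + kn + 1)) ++ Z) (descOf rs)
      (by omega) ?hT]
    case hT =>
      intro n t hnt
      obtain ⟨p, hp, rfl⟩ := pv_descOf_head rs 0 n t W0 hnt
      have := hgap p hp
      omega
    -- apply the induction hypothesis with the shorter prefix
    have hIH := ih (sn : Int) ((joinRun xs (sn : Int) (kn + 1) ++ "") :: ((xs.drop (sn + kn + 1)).take (c.toNat - (sn + kn + 1)) ++ Z))
      W0 (fun p hp => by have := hgap p hp; omega) (by omega) (by omega)
    rw [show ((sn : Int)).toNat = sn from by omega] at hIH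
    rw [hIH, pv_buildC_snoc]
    have h1 : ((sn : Int) + (kn : Int) + 1 - (sn : Int)).toNat = kn + 1 := by omega
    have h2 : ((sn : Int) + (kn : Int) + 1).toNat = sn + kn + 1 := by omega
    have h3 : (c - ((sn : Int) + (kn : Int) + 1)).toNat = c.toNat - (sn + kn + 1) := by omega
    rw [h1, h2, h3]
    simp [String.append_empty, List.append_assoc]

-- ---- B's pass ----
theorem pv_run_eq_joinRun (xs : List String) (marked : PySem.Set Int) :
    ∀ (k : Nat) (j : Nat) (fuel : Nat), k < fuel →
    (∀ m : Nat, m < k → PySem.Set.contains marked ((j + m : Nat) : Int) = true) →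
    PySem.Set.contains marked ((j + k : Nat) : Int) = false →
    pvRun xs marked fuel j = joinRun xs (j : Int) k := by
  intro k
  induction k with
  | zero =>
    intro j fuel hf _ h0
    cases fuel with
    | zero => omega
    | succ f =>
      simp only [Nat.add_zero] at h0
      simp at h0
      simp [pvRun, joinRun, h0]
  | succ k ih =>
    intro j fuel hf hm h0
    cases fuel with
    | zero => omega
    | succ f =>
      have hj : PySem.Set.contains marked ((j : Nat) : Int) = true := by
        have := hm 0 (by omega)
        simpa using this
      simp only [pvRun, hj, if_true]
      rw [ih (j+1) f (by omega) ?_ ?_]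
      · have hc : ((j+1 : Nat) : Int) = (j : Int) + 1 := by push_cast; ring
        simp [joinRun, hc]
      · intro m hm'
        have := hm (m+1) (by omega)
        rw [show j+1+m = j+(m+1) from by omega]
        exact this
      · rw [show j+1+k = j+(k+1) from by omega]
        exact h0

theorem pv_pass_unmarked (xs : List String) (marked : PySem.Set Int) :
    ∀ (l : List String) (i : Int), (∀ j, i ≤ j → PySem.Set.contains marked j = false) →
    passB xs marked l i = l := by
  intro l
  induction l with
  | nil => intro i _; rfl
  | cons x l ihl =>
    intro i h
    have h0 : PySem.Set.contains marked i = false := h i le_rfl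
    simp only [passB, h0]
    simp only [Bool.false_eq_true, not_false_eq_true, if_true]
    rw [ihl (i+1) (fun j hj => h j (by omega))]

theorem pv_pass_skip (xs : List String) (marked : PySem.Set Int) :
    ∀ (k : Nat) (j : Int), 0 ≤ j → j + (k : Int) ≤ (xs.length : Int) →
    (∀ p, j - 1 ≤ p → p < j + (k : Int) → PySem.Set.contains marked p = true) →
    passB xs marked (xs.drop j.toNat) j = passB xs marked (xs.drop (j + (k : Int)).toNat) (j + (k : Int)) := by
  intro k
  induction k with
  | zero => intro j _ _ _; simp
  | succ k ih =>
    intro j hj hlen hm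
    have hjlen : j.toNat < xs.length := by omega
    rw [List.drop_eq_getElem_cons hjlen]
    have h1 : PySem.Set.contains marked j = true := hm j (by omega) (by omega)
    have h2 : PySem.Set.contains marked (j - 1) = true := hm (j-1) (by omega) (by omega)
    simp only [passB, h1, h2, not_true_eq_false, if_false]
    rw [show j.toNat + 1 = (j+1).toNat from by omega]
    rw [ih (j+1) (by omega) (by omega) (fun p hp1 hp2 => hm p (by omega) (by omega))]
    rw [show (j+1) + (k : Int) = j + ((k+1 : Nat) : Int) from by push_cast; ring]

theorem pv_B_main (xs : List String) (marked : PySem.Set Int) :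
    ∀ (d : Nat) (i : Int) (rs : List (Int × Int)), d = xs.length - i.toNat → 0 ≤ i →
    WFA i rs → (∀ p ∈ rs, p.2 < (xs.length : Int)) →
    (∀ j, i ≤ j → (PySem.Set.contains marked j = true ↔ InRuns rs j)) →
    (∀ s e rs', rs = (s, e) :: rs' → i = s → PySem.Set.contains marked (s - 1) = false) →
    passB xs marked (xs.drop i.toNat) i = buildC xs rs i (xs.length : Int) := by
  intro d
  induction d using Nat.strong_induction_on with
  | _ d ihd =>
    intro i rs hd hi hw hb H1 H2
    cases rs with
    | nil =>
      have hnm : ∀ j, i ≤ j → PySem.Set.contains marked j = false := by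
        intro j hj
        cases hc : PySem.Set.contains marked j with
        | false => rfl
        | true =>
          exfalso
          obtain ⟨p, hp, -⟩ := (H1 j hj).mp hc
          simp at hp
      rw [pv_pass_unmarked xs marked _ i hnm]
      simp only [buildC]
      rw [List.take_of_length_le (by simp; omega)]
    | cons q rs' =>
      obtain ⟨a, b⟩ := q
      obtain ⟨hia, hab, hw'⟩ := hw
      have hbn : b < (xs.length : Int) := hb (a, b) (by simp)
      have hfirst : ∀ j, InRuns ((a, b) :: rs') j → a ≤ j := by
        intro j hj
        rcases (pv_InRuns_cons (a, b) rs' j).mp hj with ⟨h1, -⟩ | h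
        · exact h1
        · have := pv_InRuns_ge rs' (b+2) j hw' h
          omega
      have hup : ∀ j, b + 1 ≤ j → (PySem.Set.contains marked j = true ↔ InRuns rs' j) := by
        intro j hj
        rw [H1 j (by omega), pv_InRuns_cons]
        constructor
        · rintro (⟨-, h2⟩ | h)
          · omega
          · exact h
        · exact fun h => Or.inr h
      rcases eq_or_lt_of_le hia with rfl | hlt
      · -- i = a : the start of a run
        have hci : PySem.Set.contains marked i = true :=
          (H1 i le_rfl).mpr ((pv_InRuns_cons (i, b) rs' i).mpr (Or.inl ⟨le_rfl, hab⟩))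
        have hci1 : PySem.Set.contains marked (i - 1) = false := H2 i b rs' rfl rfl
        have hilen : i.toNat < xs.length := by omega
        rw [List.drop_eq_getElem_cons hilen]
        simp only [passB, hci, hci1, not_true_eq_false, if_false, Bool.false_eq_true,
          not_false_eq_true, if_true]
        have hrun : pvRun xs marked (xs.length + 1) i.toNat = joinRun xs i ((b + 1 - i).toNat) := by
          have hmarks : ∀ m : Nat, m < (b + 1 - i).toNat →
              PySem.Set.contains marked ((i.toNat + m : Nat) : Int) = true := by
            intro m hm
            rw [show ((i.toNat + m : Nat) : Int) = i + (m : Int) from by omega]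
            exact (H1 (i + m) (by omega)).mpr
              ((pv_InRuns_cons (i, b) rs' (i + m)).mpr (Or.inl ⟨by omega, by omega⟩))
          have hbd : PySem.Set.contains marked ((i.toNat + (b + 1 - i).toNat : Nat) : Int) = false := by
            rw [show ((i.toNat + (b + 1 - i).toNat : Nat) : Int) = b + 1 from by omega]
            cases hc : PySem.Set.contains marked (b + 1) with
            | false => rfl
            | true =>
              exfalso
              rcases (pv_InRuns_cons (i, b) rs' (b+1)).mp ((H1 (b+1) (by omega)).mp hc) with ⟨-, h2⟩ | h
              · omega
              · have := pv_InRuns_ge rs' (b+2) (b+1) hw' h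
                omega
          have hre := pv_run_eq_joinRun xs marked ((b + 1 - i).toNat) i.toNat (xs.length + 1)
            (by omega) hmarks hbd
          rw [hre, show ((i.toNat : Nat) : Int) = i from by omega]
        have hskip : passB xs marked (xs.drop (i.toNat + 1)) (i + 1)
            = passB xs marked (xs.drop (b + 1).toNat) (b + 1) := by
          have hsk := pv_pass_skip xs marked ((b - i).toNat) (i + 1) (by omega) (by omega) ?_
          · rw [show (i+1).toNat = i.toNat + 1 from by omega] at hsk
            rw [show (i+1) + (((b - i).toNat : Nat) : Int) = b + 1 from by omega] at hsk
            exact hsk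
          · intro p hp1 hp2
            exact (H1 p (by omega)).mpr
              ((pv_InRuns_cons (i, b) rs' p).mpr (Or.inl ⟨by omega, by omega⟩))
        have hrec := ihd (xs.length - (b+1).toNat) (by omega) (b+1) rs' rfl (by omega)
          (pv_WFA_mono rs' (b+2) (b+1) (by omega) hw') (fun p hp => hb p (List.mem_cons_of_mem _ hp)) hup ?_
        · rw [hrun, hskip, hrec]
          simp [buildC]
        · intro s e rs'' heq heq2
          exfalso
          have := (pv_WFA_le rs' (b+2) hw' (s, e) (by rw [heq]; simp)).1
          omega
      · -- i < a : an unmarked position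
        have hilen : i.toNat < xs.length := by omega
        have hci : PySem.Set.contains marked i = false := by
          cases hc : PySem.Set.contains marked i with
          | false => rfl
          | true =>
            exfalso
            have := hfirst i ((H1 i le_rfl).mp hc)
            omega
        rw [List.drop_eq_getElem_cons hilen]
        simp only [passB, hci, Bool.false_eq_true, not_false_eq_true, if_true]
        have hrec := ihd (xs.length - (i+1).toNat) (by omega) (i+1) ((a, b) :: rs') rfl (by omega)
          ⟨by omega, hab, hw'⟩ hb (fun j hj => H1 j (by omega)) ?_
        · rw [show (i+1).toNat = i.toNat + 1 from by omega] at hrec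
          rw [hrec]
          simp only [buildC]
          rw [List.drop_eq_getElem_cons hilen,
            show (a - i).toNat = (a - (i+1)).toNat + 1 from by omega, List.take_succ_cons,
            show (i+1).toNat = i.toNat + 1 from by omega]
          simp [List.cons_append]
        · intro s e rs'' heq heq2
          obtain ⟨h1, h2⟩ := List.cons.injEq .. |>.mp heq
          have hsa : a = s := congrArg Prod.fst h1
          rw [show s - 1 = i from by omega]
          exact hci

-- ===== VERDICT (by name: the statement is the Claim_ definition above) =====
theorem convert_measurements_spec : Claim_equal_convert_measurements := by
  intro xs _
  show convert_measurements xs = convert_measurements_alt xs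
  have hIbnd := pv_I_bounds xs
  have hInd := pv_I_nodup xs
  have hLbnd : ∀ x ∈ pvL xs, 0 ≤ x ∧ x < (xs.length : Int) :=
    fun x hx => hIbnd x ((pv_L_mem xs x).mp hx)
  obtain ⟨W, M, F, Bnd⟩ := pv_runsOf (pvL xs) 0 (pv_L_pairwise xs) (fun x hx => (hLbnd x hx).1)
  have hD : descOf (runsOf none (pvL xs)) = (pvL xs).reverse := by
    rw [pv_descOf_eq _ (fun p hp => (pv_WFA_le _ 0 W p hp).2), F]
  -- the A side
  have hA : convert_measurements xs
      = (gA xs (descOf (runsOf none (pvL xs))) ("", xs)).2 := by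
    simp only [convert_measurements]
    rw [pv_fold_index xs _ []]
    rw [PySem.List.slice_to_neg_one, PySem.List.slice_from_one, List.dropLast_concat]
    rw [pv_fold_zip xs _ ("", xs)]
    rw [hD]
    rfl
  -- the B side
  have hmarked : (PySem.Set.inter MEASUREMENTS (PySem.Set.ofList xs)).foldl
      (pvMarkStep xs) PySem.Set.empty = pvI xs := by
    rw [pv_fold_mark xs _ PySem.Set.empty]
    show PySem.Set.ofList (pvI xs) = pvI xs
    exact PySem.Set.ofList_eq_self_of_nodup (pvI xs) hInd
  have hB : convert_measurements_alt xs = passB xs (pvI xs) xs 0 := by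
    simp only [convert_measurements_alt]
    rw [hmarked, pv_fold_emit xs (pvI xs) xs 0 []]
    rfl
  -- both sides equal buildC
  have hAmain := pv_A_main xs (runsOf none (pvL xs)) (xs.length : Int) [] W
    (fun p hp => (hLbnd p.2 (Bnd p hp)).2) (by omega) le_rfl
  rw [show ((xs.length : Int)).toNat = xs.length from by omega, List.take_length,
    List.append_nil] at hAmain
  have hBmain := pv_B_main xs (pvI xs) xs.length 0 (runsOf none (pvL xs)) (by simp) le_rfl W
    (fun p hp => (hLbnd p.2 (Bnd p hp)).2) ?_ ?_
  · rw [hA, hAmain, hB]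
    rw [show ((0 : Int)).toNat = 0 from rfl, List.drop_zero] at hBmain
    rw [hBmain]
    simp
  · intro j _
    rw [PySem.Set.contains_iff (pvI xs) j, ← pv_L_mem xs j]
    exact (M j).symm
  · intro s e rs' _ hs0
    cases hc : PySem.Set.contains (pvI xs) (s - 1) with
    | false => rfl
    | true =>
      exfalso
      have hm := (PySem.Set.contains_iff (pvI xs) (s - 1)).mp hc
      have h0 := (hIbnd (s - 1) hm).1
      omega
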